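-- pv_equiv track=rewrite | github.com/Wilian6349/DesafioPWC | test5.py | is_anagram_of_palindrome
-- ===== SOURCE A (Python) =====
-- def is_anagram_of_palindrome(string):
--     char_counts = {}
--     for char in string:
--         if char in char_counts:
--             char_counts[char] += 1
--         else:
--             char_counts[char] = 1
--
--     odd_count = 0
--     for count in char_counts.values():
--         if count % 2 != 0:
--             odd_count += 1
--
--     return odd_count <= 1
-- ===== SOURCE B (Python) =====
-- def is_anagram_of_palindrome(string):
--     odd = set()
--     for char in string:
--         if char in odd:
--             odd.discard(char)
--         else:
--             odd.add(char)
--     return len(odd) <= 1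
-- ===== Notes on version B (the rewrite author's own statement) =====
-- stated objective: simpler
-- what changed: Instead of building a full character-frequency dict and then scanning its values for odd counts, B keeps a single set of characters seen an odd number of times, toggling membership in one pass, and returns len(set) <= 1.
import Mathlib
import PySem

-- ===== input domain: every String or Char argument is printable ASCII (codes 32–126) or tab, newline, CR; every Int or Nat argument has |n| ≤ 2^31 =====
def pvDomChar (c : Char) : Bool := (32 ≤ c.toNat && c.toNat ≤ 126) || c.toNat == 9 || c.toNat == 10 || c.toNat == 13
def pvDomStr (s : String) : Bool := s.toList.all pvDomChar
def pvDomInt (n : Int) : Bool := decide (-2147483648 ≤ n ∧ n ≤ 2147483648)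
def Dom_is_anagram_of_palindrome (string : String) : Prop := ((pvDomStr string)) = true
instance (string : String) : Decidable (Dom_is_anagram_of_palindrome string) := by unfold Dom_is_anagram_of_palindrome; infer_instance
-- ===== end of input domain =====

-- B replaces A's frequency dict + odd-count scan by one pass that toggles each
-- character in a set of odd-parity characters (objective: simpler).

-- ===== PORT A =====
def is_anagram_of_palindrome (string : String) : Bool :=
  let char_counts : PySem.Dict Char Int := string.toList.foldl
    (fun d char => if d.contains char then d.insert char (d.getD char 0 + 1)
                   else d.insert char 1)
    PySem.Dict.empty
  let odd_count : Int := char_counts.values.foldl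
    (fun odd_count count => if PySem.Int.mod count 2 ≠ 0 then odd_count + 1 else odd_count)
    0
  decide (odd_count ≤ 1)

-- ===== PORT B =====
def is_anagram_of_palindrome_alt (string : String) : Bool :=
  let odd : PySem.Set Char := string.toList.foldl
    (fun odd char => if PySem.Set.contains odd char then PySem.Set.discard odd char
                     else PySem.Set.add odd char)
    PySem.Set.empty
  decide (PySem.Set.len odd ≤ 1)

-- ===== PRECONDITION & SPEC =====
def Spec_is_anagram_of_palindrome (string : String) (out : Bool) : Prop := out = is_anagram_of_palindrome_alt string
instance (string : String) (out : Bool) : Decidable (Spec_is_anagram_of_palindrome string out) := by unfold Spec_is_anagram_of_palindrome; infer_instance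

-- ===== CLAIM (what is proved, stated in full; the proofs are below) =====
def Claim_equal_is_anagram_of_palindrome : Prop := ∀ (string : String), Dom_is_anagram_of_palindrome string → Spec_is_anagram_of_palindrome string (is_anagram_of_palindrome string)

-- ===== LEMMAS AND PROOFS =====

-- B's toggle step, named for the proofs below.
def pvToggle (odd : PySem.Set Char) (char : Char) : PySem.Set Char :=
  if PySem.Set.contains odd char then PySem.Set.discard odd char
  else PySem.Set.add odd char

-- A's dict-building loop is exactly the Counter fold.
lemma pvCounts_eq_counter (l : List Char) :
    l.foldl (fun (d : PySem.Dict Char Int) char =>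
        if d.contains char then d.insert char (d.getD char 0 + 1) else d.insert char 1)
      PySem.Dict.empty = PySem.Dict.counter l := by
  have hf : (fun (d : PySem.Dict Char Int) char =>
      if d.contains char then d.insert char (d.getD char 0 + 1) else d.insert char 1)
      = fun d x => d.insert x (d.getD x 0 + 1) := by
    funext d c
    by_cases h : d.contains c
    · simp [h]
    · have h0 : d.getD c 0 = 0 :=
        PySem.Dict.getD_of_not_contains d 0 (by simpa using h)
      simp [h, h0]
  rw [hf, PySem.Dict.foldl_insert_getD_add_one_eq_counter]

-- A's odd_count is the number of distinct characters with odd multiplicity.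
lemma pvOddCount_eq (l : List Char) :
    ((PySem.Dict.counter l).values.foldl
      (fun odd_count count => if PySem.Int.mod count 2 ≠ 0 then odd_count + 1 else odd_count)
      (0 : Int))
    = ((PySem.Set.ofList l).countP (fun c => decide (l.count c % 2 = 1)) : Int) := by
  have hv : (PySem.Dict.counter l).values
      = (PySem.Set.ofList l).map (fun k => (l.count k : Int)) := by
    simp only [PySem.Dict.values, PySem.Dict.items_counter, List.map_map]
    rfl
  rw [hv, PySem.List.foldl_ite_add_one, List.countP_map]
  rw [zero_add]
  congr 1
  apply List.countP_congr
  intro c _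
  simp only [Function.comp_apply, decide_eq_true_eq]
  rw [PySem.Int.mod_eq_emod_of_pos (by norm_num : (0:Int) < 2)]
  omega

lemma pvToggle_of_mem (s : PySem.Set Char) (c : Char) (h : c ∈ s) :
    pvToggle s c = PySem.Set.discard s c := by
  unfold pvToggle
  rw [if_pos ((PySem.Set.contains_iff s c).mpr h)]

lemma pvToggle_of_not_mem (s : PySem.Set Char) (c : Char) (h : c ∉ s) :
    pvToggle s c = PySem.Set.add s c := by
  unfold pvToggle
  rw [if_neg (fun hh => h ((PySem.Set.contains_iff s c).mp hh))]

-- B's toggle loop: the set is duplicate-free and holds exactly the odd-count characters.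
lemma pvToggle_invariant (l : List Char) :
    (l.foldl pvToggle PySem.Set.empty).Nodup ∧
    ∀ x, x ∈ l.foldl pvToggle PySem.Set.empty ↔ l.count x % 2 = 1 := by
  induction l using List.reverseRecOn with
  | nil => simp [PySem.Set.empty]
  | append_singleton l c ih =>
    obtain ⟨hnd, hmem⟩ := ih
    rw [List.foldl_append, List.foldl_cons, List.foldl_nil]
    by_cases h : c ∈ l.foldl pvToggle PySem.Set.empty
    · rw [pvToggle_of_mem _ _ h]
      refine ⟨PySem.Set.nodup_discard _ c hnd, fun x => ?_⟩
      have hc : l.count c % 2 = 1 := (hmem c).mp h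
      rw [PySem.Set.mem_discard, hmem x, List.count_append, List.count_singleton]
      by_cases hx : x = c
      · subst hx; simp; omega
      · have hcx : ¬ c = x := fun hh => hx hh.symm
        simp [hx, hcx]
    · rw [pvToggle_of_not_mem _ _ h]
      refine ⟨PySem.Set.nodup_add _ c hnd, fun x => ?_⟩
      have hc : ¬ l.count c % 2 = 1 := fun hh => h ((hmem c).mpr hh)
      rw [PySem.Set.mem_add, hmem x, List.count_append, List.count_singleton]
      by_cases hx : x = c
      · subst hx; simp; omega
      · have hcx : ¬ c = x := fun hh => hx hh.symm
        simp [hx, hcx]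

-- B's set length equals A's odd_count.
lemma pvLen_eq (l : List Char) :
    PySem.Set.len (l.foldl pvToggle PySem.Set.empty)
    = ((PySem.Set.ofList l).countP (fun c => decide (l.count c % 2 = 1)) : Int) := by
  obtain ⟨hnd, hmem⟩ := pvToggle_invariant l
  have hperm : (l.foldl pvToggle PySem.Set.empty).Perm
      ((PySem.Set.ofList l).filter (fun c => decide (l.count c % 2 = 1))) := by
    rw [List.perm_ext_iff_of_nodup hnd (List.Nodup.filter _ (PySem.Set.nodup_ofList l))]
    intro x
    rw [hmem x, List.mem_filter, PySem.Set.mem_ofList]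
    constructor
    · intro h
      refine ⟨?_, by simpa using h⟩
      by_contra hx
      simp [List.count_eq_zero_of_not_mem hx] at h
    · intro h
      simpa using h.2
  have hlen := hperm.length_eq
  show ((l.foldl pvToggle PySem.Set.empty).length : Int) = _
  rw [hlen, ← List.countP_eq_length_filter]

-- ===== VERDICT (by name: the statement is the Claim_ definition above) =====
theorem is_anagram_of_palindrome_spec : Claim_equal_is_anagram_of_palindrome := by
  intro s _
  unfold Spec_is_anagram_of_palindrome is_anagram_of_palindrome is_anagram_of_palindrome_alt
  show decide _ = decide _
  rw [pvCounts_eq_counter, pvOddCount_eq]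
  rw [show (fun (odd : PySem.Set Char) char =>
      if PySem.Set.contains odd char then PySem.Set.discard odd char
      else PySem.Set.add odd char) = pvToggle from rfl]
  rw [pvLen_eq]
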